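-- pv_equiv track=rewrite | github.com/SymphonyIceAttack/pytoexe-use | python-files/1772011425747-c8qo-searchnew.py | parse_file_range
-- ===== SOURCE A (Python) =====
-- def parse_file_range(range_str, max_num):
--     """Разбирает строку с диапазонами номеров файлов"""
--     selected = []
--     parts = range_str.split(',')
--
--     for part in parts:
--         part = part.strip()
--         if '-' in part:
--             start, end = map(int, part.split('-'))
--             start = max(1, min(start, max_num))
--             end = max(start, min(end, max_num))
--             selected.extend(range(start, end + 1))
--         else:
--             try:
--                 num = int(part)
--                 if 1 <= num <= max_num:
--                     selected.append(num)
--             except ValueError: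
--                 continue
--
--     return sorted(list(set(selected)))
-- ===== SOURCE B (Python) =====
-- def parse_file_range(range_str, max_num):
--     """Разбирает строку с диапазонами номеров файлов"""
--     # Parse each comma part into an optional clamped (start, end) interval,
--     # sort the intervals by start, then emit the sorted unique numbers with a
--     # recursive duplicate-skipping sweep (no per-number set/dedup, no final sort).
--     def interval(part):
--         part = part.strip()
--         if '-' in part:
--             a, b = part.split('-')
--             s = max(1, min(int(a), max_num))
--             return (s, max(s, min(int(b), max_num)))
--         try:
--             n = int(part)
--         except ValueError:
--             return None
--         return (n, n) if 1 <= n <= max_num else None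
--
--     ivs = sorted((iv for iv in map(interval, range_str.split(','))
--                   if iv is not None), key=lambda iv: iv[0])
--
--     def sweep(ivs, last):
--         if not ivs:
--             return []
--         (s, e), rest = ivs[0], ivs[1:]
--         return (list(range(max(s, last + 1), e + 1))
--                 + sweep(rest, max(e, last)))
--
--     return sweep(ivs, 0)
-- ===== Notes on version B (the rewrite author's own statement) =====
-- stated objective: alternative
-- what changed: Instead of materialising every number of every range and then deduplicating with set() and sorting, B parses each part into an optional clamped interval, sorts the intervals by start, and emits the sorted unique numbers by a recursive sweep that skips already-covered values; the expand-all/set/sorted pipeline disappears.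
import Mathlib
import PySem

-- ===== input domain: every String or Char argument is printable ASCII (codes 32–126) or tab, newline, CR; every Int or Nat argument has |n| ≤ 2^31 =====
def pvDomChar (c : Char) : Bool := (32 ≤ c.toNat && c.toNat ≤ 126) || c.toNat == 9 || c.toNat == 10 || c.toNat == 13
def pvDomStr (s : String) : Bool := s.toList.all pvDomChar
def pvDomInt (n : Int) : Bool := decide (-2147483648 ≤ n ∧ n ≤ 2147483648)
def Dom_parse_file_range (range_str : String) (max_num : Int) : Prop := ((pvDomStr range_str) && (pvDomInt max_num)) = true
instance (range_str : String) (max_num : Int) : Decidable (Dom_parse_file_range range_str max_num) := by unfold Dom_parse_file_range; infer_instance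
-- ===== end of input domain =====

-- B replaces A's expand-all-numbers + set() + sorted() by parsing each part into an
-- optional clamped interval, sorting the intervals by start, and a recursive
-- duplicate-skipping sweep that emits the sorted unique numbers directly.

-- ===== PORT A =====
-- loop body of A's `for part in parts` (split?/ofStr? return none exactly where Python raises; those inputs are outside Pre_)
def pvStepA (max_num : Int) (sel : List Int) (part : String) : List Int :=
  if PySem.Str.isIn "-" (PySem.Str.strip part) then
    match ((PySem.Str.split? (PySem.Str.strip part) "-").getD []).map PySem.Int.ofStr? with
    | [some s0, some e0] =>
        sel ++ PySem.List.pyRange (max 1 (min s0 max_num))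
                 (max (max 1 (min s0 max_num)) (min e0 max_num) + 1)
    | _ => sel                       -- Python raises ValueError here; excluded by Pre_
  else
    match PySem.Int.ofStr? (PySem.Str.strip part) with
    | some num => if 1 ≤ num ∧ num ≤ max_num then sel ++ [num] else sel
    | none => sel                    -- try/except ValueError: continue

def parse_file_range (range_str : String) (max_num : Int) : List Int :=
  PySem.List.sorted
    (PySem.Set.ofList (((PySem.Str.split? range_str ",").getD []).foldl (pvStepA max_num) []))
    (fun x => x) false

-- ===== PORT B =====
-- B's helper `interval(part)`: the optional clamped interval of one comma part
def pvInterval (max_num : Int) (part : String) : Option (Int × Int) :=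
  if PySem.Str.isIn "-" (PySem.Str.strip part) then
    match (PySem.Str.split? (PySem.Str.strip part) "-").getD [] with
    | [a, b] =>
        match PySem.Int.ofStr? a, PySem.Int.ofStr? b with
        | some sa, some sb =>
            some (max 1 (min sa max_num),
                  max (max 1 (min sa max_num)) (min sb max_num))
        | _, _ => none               -- Python raises ValueError; excluded by Pre_
    | _ => none                      -- unpack raises ValueError; excluded by Pre_
  else
    match PySem.Int.ofStr? (PySem.Str.strip part) with
    | none => none
    | some n => if 1 ≤ n ∧ n ≤ max_num then some (n, n) else none

-- B's helper `sweep(ivs, last)`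
def pvSweep : List (Int × Int) → Int → List Int
  | [], _ => []
  | (s, e) :: rest, last =>
      PySem.List.pyRange (max s (last + 1)) (e + 1) ++ pvSweep rest (max e last)

def parse_file_range_alt (range_str : String) (max_num : Int) : List Int :=
  pvSweep
    (PySem.List.sorted
      ((((PySem.Str.split? range_str ",").getD []).map (pvInterval max_num)).filterMap id)
      (fun iv => iv.1) false)
    0

-- ===== PRECONDITION & SPEC =====
-- Pre_ excludes exactly the inputs where Python A raises ValueError (uncaught, from
-- `start, end = map(int, part.split('-'))`): a comma part whose strip contains '-' but
-- does not split at '-' into exactly two int()-parsable pieces.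
def Pre_parse_file_range (range_str : String) (max_num : Int) : Prop :=
  ∀ part ∈ (PySem.Str.split? range_str ",").getD [],
    PySem.Str.isIn "-" (PySem.Str.strip part) = true →
    ((PySem.Str.split? (PySem.Str.strip part) "-").getD []).length = 2 ∧
    ∀ q ∈ (PySem.Str.split? (PySem.Str.strip part) "-").getD [],
      (PySem.Int.ofStr? q).isSome = true
instance (range_str : String) (max_num : Int) : Decidable (Pre_parse_file_range range_str max_num) := by
  unfold Pre_parse_file_range; infer_instance
def pvWitness_parse_file_range : String × Int := ("1-3, 5, x", 10)

def Spec_parse_file_range (range_str : String) (max_num : Int) (out : List Int) : Prop := out = parse_file_range_alt range_str max_num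
instance (range_str : String) (max_num : Int) (out : List Int) : Decidable (Spec_parse_file_range range_str max_num out) := by unfold Spec_parse_file_range; infer_instance

-- ===== CLAIM (what is proved, stated in full; the proofs are below) =====
def Claim_equal_parse_file_range : Prop := ∀ (range_str : String) (max_num : Int), Dom_parse_file_range range_str max_num → Pre_parse_file_range range_str max_num → Spec_parse_file_range range_str max_num (parse_file_range range_str max_num)

-- ===== LEMMAS AND PROOFS =====

def pvExpand (iv : Int × Int) : List Int := PySem.List.pyRange iv.1 (iv.2 + 1)

-- A's loop body appends exactly the expansion of the part's optional interval
lemma pvStepA_eq (m : Int) (sel : List Int) (part : String) :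
    pvStepA m sel part = sel ++ ((pvInterval m part).toList).flatMap pvExpand := by
  unfold pvStepA pvInterval pvExpand
  by_cases h : PySem.Str.isIn "-" (PySem.Str.strip part) = true
  · simp only [h, if_true]
    rcases hsp : (PySem.Str.split? (PySem.Str.strip part) "-").getD [] with _ | ⟨a, _ | ⟨b, _ | ⟨c, t⟩⟩⟩ <;>
        simp only [List.map_nil, List.map_cons]
    · simp
    · rcases ha : PySem.Int.ofStr? a with _ | sa <;> simp
    · rcases ha : PySem.Int.ofStr? a with _ | sa <;>
        rcases hb : PySem.Int.ofStr? b with _ | sb <;> simp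
    · rcases ha : PySem.Int.ofStr? a with _ | sa <;>
        rcases hb : PySem.Int.ofStr? b with _ | sb <;> simp
  · have h2 : PySem.Str.isIn "-" (PySem.Str.strip part) = false := by
      simpa using h
    simp only [h2, Bool.false_eq_true, if_false]
    rcases hn : PySem.Int.ofStr? (PySem.Str.strip part) with _ | n
    · simp
    · by_cases hb : 1 ≤ n ∧ n ≤ m <;> simp [hb]

lemma pvFoldA (m : Int) (parts : List String) :
    parts.foldl (pvStepA m) [] =
      ((parts.map (pvInterval m)).filterMap id).flatMap pvExpand := by
  have h : parts.foldl (pvStepA m) [] =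
      parts.foldl (fun sel part => sel ++ ((pvInterval m part).toList).flatMap pvExpand) [] := by
    apply List.foldl_ext
    intro sel part _; exact pvStepA_eq m sel part
  rw [h, PySem.List.foldl_append_eq_flatMap, List.filterMap_map,
    List.filterMap_eq_flatMap_toList]
  simp [List.flatMap_def, List.map_map, Function.comp_def, List.flatten_flatten]

lemma pvInterval_bounds (m : Int) (part : String) :
    ∀ iv ∈ (pvInterval m part), 1 ≤ iv.1 ∧ iv.1 ≤ iv.2 := by
  intro iv hiv
  unfold pvInterval at hiv
  revert hiv
  split
  · split
    · split
      · intro hiv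
        simp only [Option.mem_def, Option.some.injEq] at hiv
        subst hiv; exact ⟨le_max_left _ _, le_max_left _ _⟩
      · simp
    · simp
  · split
    · simp
    · split
      · rename_i hn
        intro hiv
        simp only [Option.mem_def, Option.some.injEq] at hiv
        subst hiv; exact ⟨hn.1, le_refl _⟩
      · simp

-- B's sweep over intervals sorted by start: strictly increasing output, every element
-- above `last`, membership = covered by some interval and above `last`
lemma pvSweep_spec :
    ∀ (L : List (Int × Int)) (last : Int),
      L.Pairwise (fun a b => a.1 ≤ b.1) →
      (pvSweep L last).Pairwise (· < ·) ∧
      (∀ v : Int, v ∈ pvSweep L last ↔ last < v ∧ ∃ iv ∈ L, iv.1 ≤ v ∧ v ≤ iv.2) := by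
  intro L
  induction L with
  | nil => intro last _; simp [pvSweep]
  | cons iv rest ih =>
    intro last hpair
    obtain ⟨s, e⟩ := iv
    obtain ⟨ihpw, ihmem⟩ := ih (max e last) hpair.tail
    have hhead : ∀ iv' ∈ rest, s ≤ iv'.1 := by
      intro iv' h; exact List.rel_of_pairwise_cons hpair h
    constructor
    · refine List.pairwise_append.mpr ⟨PySem.List.pairwise_lt_pyRange_one _ _, ihpw, ?_⟩
      intro a ha b hb
      have ha' := PySem.List.mem_pyRange_one.mp ha
      have hb' := ((ihmem b).mp hb).1
      omega
    · intro v
      simp only [pvSweep, List.mem_append, PySem.List.mem_pyRange_one, ihmem]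
      constructor
      · rintro (⟨h1, h2⟩ | ⟨h1, iv', hiv', h2, h3⟩)
        · exact ⟨by omega, ⟨s, e⟩, List.mem_cons_self, by omega, by omega⟩
        · exact ⟨by omega, iv', List.mem_cons_of_mem _ hiv', h2, h3⟩
      · rintro ⟨hlast, iv', hiv', h1, h2⟩
        rcases List.mem_cons.mp hiv' with h | h
        · subst h; left; omega
        · by_cases hve : v ≤ e
          · have := hhead iv' h; left; omega
          · right; exact ⟨by omega, iv', h, h1, h2⟩

-- main combinatorial step: for intervals with 1 ≤ start ≤ end, A's expand+dedup+sort
-- equals B's sort-by-start + sweep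
lemma pvMain (I : List (Int × Int)) (hIb : ∀ iv ∈ I, 1 ≤ iv.1 ∧ iv.1 ≤ iv.2) :
    PySem.List.sorted (PySem.Set.ofList (I.flatMap pvExpand)) (fun x => x) false =
      pvSweep (PySem.List.sorted I (fun iv => iv.1) false) 0 := by
  obtain ⟨hpw, hmem⟩ := pvSweep_spec (PySem.List.sorted I (fun iv => iv.1) false) 0
    (PySem.List.sorted_pairwise I (fun iv => iv.1))
  apply PySem.List.sorted_eq_of_perm_of_pairwise_lt _ _ _ _ hpw
  rw [List.perm_ext_iff_of_nodup (hpw.nodup) (PySem.Set.nodup_ofList _)]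
  intro v
  rw [hmem v, PySem.Set.mem_ofList, List.mem_flatMap]
  constructor
  · rintro ⟨_, iv, hiv, h1, h2⟩
    exact ⟨iv, (PySem.List.mem_sorted I _ false iv).mp hiv,
      PySem.List.mem_pyRange_one.mpr ⟨h1, by omega⟩⟩
  · rintro ⟨iv, hiv, hv⟩
    have hr := PySem.List.mem_pyRange_one.mp hv
    have hb := hIb iv hiv
    exact ⟨by omega, iv, (PySem.List.mem_sorted I _ false iv).mpr hiv, by omega, by omega⟩

-- ===== VERDICT (by name: the statement is the Claim_ definition above) =====
set_option maxHeartbeats 1600000 in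
theorem parse_file_range_spec : Claim_equal_parse_file_range := by
  intro range_str max_num _hdom _hpre
  unfold Spec_parse_file_range parse_file_range parse_file_range_alt
  rw [pvFoldA]
  apply pvMain
  intro iv hiv
  obtain ⟨o, ho, hiv2⟩ := List.mem_filterMap.mp hiv
  obtain ⟨part, _, hop⟩ := List.mem_map.mp ho
  subst hop
  exact pvInterval_bounds max_num part iv hiv2
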